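-- pv_equiv track=rewrite | github.com/ramizik/stealthD | camera_analysis/shot_detector.py | get_shot_segments
-- ===== SOURCE A (Python) =====
-- from typing import List, Optional, Tuple
--
-- def get_shot_segments(shot_boundaries: List[int],
--                      total_frames: int) -> List[Tuple[int, int]]:
--     """
--     Convert shot boundaries to (start, end) frame segments.
--
--     Args:
--         shot_boundaries: List of frame indices where shots start
--         total_frames: Total number of frames in video
--
--     Returns:
--         List of (start_frame, end_frame) tuples
--         Example: [(0, 144), (145, 341), (342, 566)]
--     """
--     segments = []
--
--     for i in range(len(shot_boundaries)):
--         start_frame = shot_boundaries[i]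
--
--         # End frame is either next boundary - 1, or last frame
--         if i < len(shot_boundaries) - 1:
--             end_frame = shot_boundaries[i + 1] - 1
--         else:
--             end_frame = total_frames - 1
--
--         segments.append((start_frame, end_frame))
--
--     return segments
-- ===== SOURCE B (Python) =====
-- def get_shot_segments(shot_boundaries, total_frames):
--     segments = []
--     next_start = total_frames
--     for b in reversed(shot_boundaries):
--         segments.append((b, next_start - 1))
--         next_start = b
--     segments.reverse()
--     return segments
-- ===== Notes on version B (the rewrite author's own statement) =====
-- stated objective: alternative
-- what changed: Traverses the boundaries right-to-left carrying the next shot's start as an accumulator (so each end frame is computed from carried state, with no lookahead index and no last-index branch), building segments back-to-front and reversing at the end.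
import Mathlib
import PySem

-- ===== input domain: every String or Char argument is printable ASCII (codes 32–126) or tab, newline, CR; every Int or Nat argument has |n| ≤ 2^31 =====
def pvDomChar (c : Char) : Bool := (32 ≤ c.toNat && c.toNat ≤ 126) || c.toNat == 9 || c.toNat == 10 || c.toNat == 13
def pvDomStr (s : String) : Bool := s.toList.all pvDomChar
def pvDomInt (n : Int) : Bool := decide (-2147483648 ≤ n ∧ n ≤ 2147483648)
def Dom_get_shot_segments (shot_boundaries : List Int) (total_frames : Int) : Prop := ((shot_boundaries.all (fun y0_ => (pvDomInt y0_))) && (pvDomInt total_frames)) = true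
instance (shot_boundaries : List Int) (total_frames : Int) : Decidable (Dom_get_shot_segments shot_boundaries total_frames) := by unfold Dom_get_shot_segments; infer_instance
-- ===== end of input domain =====

-- B traverses the boundaries right-to-left carrying the next shot's start as an accumulator,
-- building the segments back-to-front and reversing at the end (objective: alternative decomposition).

-- ===== PORT A =====
-- index loop over range(len(shot_boundaries)); indices i and i+1 (in the guarded branch) are always in range
def get_shot_segments (shot_boundaries : List Int) (total_frames : Int) : List (Int × Int) :=
  (List.range shot_boundaries.length).foldl (fun segments i =>
    let start_frame := (PySem.List.pyGet? shot_boundaries (Int.ofNat i)).getD 0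
    let end_frame :=
      if (i : Int) < (shot_boundaries.length : Int) - 1 then
        (PySem.List.pyGet? shot_boundaries (Int.ofNat (i + 1))).getD 0 - 1
      else
        total_frames - 1
    segments ++ [(start_frame, end_frame)]) []

-- ===== PORT B =====
-- reversed(shot_boundaries) is .reverse; the loop carries (segments, next_start); final .reverse
def get_shot_segments_alt (shot_boundaries : List Int) (total_frames : Int) : List (Int × Int) :=
  let st := shot_boundaries.reverse.foldl
    (fun (st : List (Int × Int) × Int) b => (st.1 ++ [(b, st.2 - 1)], b))
    ([], total_frames)
  st.1.reverse

-- ===== PRECONDITION & SPEC =====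
def Spec_get_shot_segments (shot_boundaries : List Int) (total_frames : Int) (out : List (Int × Int)) : Prop := out = get_shot_segments_alt shot_boundaries total_frames
instance (shot_boundaries : List Int) (total_frames : Int) (out : List (Int × Int)) : Decidable (Spec_get_shot_segments shot_boundaries total_frames out) := by unfold Spec_get_shot_segments; infer_instance

-- ===== CLAIM =====
def Claim_equal_get_shot_segments : Prop := ∀ (shot_boundaries : List Int) (total_frames : Int), Dom_get_shot_segments shot_boundaries total_frames → Spec_get_shot_segments shot_boundaries total_frames (get_shot_segments shot_boundaries total_frames)

-- ===== LEMMAS AND PROOFS =====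

-- common normal form for both programs: zip of the boundaries with the shifted end list
def zipForm (bs : List Int) (tf : Int) : List (Int × Int) :=
  bs.zip ((bs.drop 1).map (fun b => b - 1) ++ [tf - 1])

theorem a_eq_zipForm (shot_boundaries : List Int) (total_frames : Int) :
    get_shot_segments shot_boundaries total_frames = zipForm shot_boundaries total_frames := by
  unfold get_shot_segments zipForm
  rw [PySem.List.foldl_append_singleton_eq_map]
  apply List.ext_getElem
  · simp [List.length_zip]
    omega
  · intro i h1 h2
    simp only [List.nil_append, List.getElem_map, List.getElem_range, List.getElem_zip,
      Int.ofNat_eq_natCast, PySem.List.pyGet?_natCast]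
    have hi : i < shot_boundaries.length := by simpa using h1
    split_ifs with hlt
    · have hi1 : i + 1 < shot_boundaries.length := by omega
      have hie : i < ((shot_boundaries.drop 1).map (fun b => b - 1)).length := by
        simp; omega
      rw [List.getElem_append_left hie]
      rw [List.getElem_map, List.getElem_drop]
      simp [List.getElem?_eq_getElem hi, List.getElem?_eq_getElem hi1, Nat.add_comm 1 i]
    · have hie : ((shot_boundaries.drop 1).map (fun b => b - 1)).length ≤ i := by
        simp; omega
      rw [List.getElem_append_right hie]
      simp [List.getElem?_eq_getElem hi]

-- characterisation of B's right-to-left accumulator loop (viewed as a foldr)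
theorem b_foldr_char (bs : List Int) (tf : Int) :
    bs.foldr (fun b (st : List (Int × Int) × Int) => (st.1 ++ [(b, st.2 - 1)], b)) ([], tf)
      = ((zipForm bs tf).reverse, bs.headD tf) := by
  induction bs with
  | nil => simp [zipForm]
  | cons a rest ih =>
    simp only [List.foldr_cons, ih]
    cases rest with
    | nil => simp [zipForm]
    | cons b r2 => simp [zipForm]

theorem b_eq_zipForm (shot_boundaries : List Int) (total_frames : Int) :
    get_shot_segments_alt shot_boundaries total_frames = zipForm shot_boundaries total_frames := by
  unfold get_shot_segments_alt
  rw [List.foldl_reverse]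
  simp only [b_foldr_char]
  simp

-- ===== VERDICT =====
theorem get_shot_segments_spec : Claim_equal_get_shot_segments := by
  intro bs tf _
  unfold Spec_get_shot_segments
  rw [a_eq_zipForm, b_eq_zipForm]
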